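-- pv_equiv track=rewrite | github.com/mlester12082-debug/ironhalo-demo | backend/demo_governance/engine.py | detect_config_tampering
-- ===== SOURCE A (Python) =====
-- def detect_config_tampering(config_text: str) -> bool:
--     """
--     Demo-scale config tampering detector.
--     This is where we wire in recognizable cloud-misconfig patterns so the
--     IronHalo demo lights up on realistic configs (S3, NSG, etc.).
--     """
--     t = config_text.lower()
--
--     # Existing demo patterns
--     if "allow_override = true" in t:
--         return True
--     if "risk_threshold = 0" in t:
--         return True
--     if "boundary_sensitivity" in t and "high" in t:
--         return True
--     if "delete" in t or "remove" in t:
--         return True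
--     if "admin" in t or "root" in t or "superuser" in t:
--         return True
--
--     # -----------------------------------------------------------------------
--     # New: Test #1 – S3 anti-forensic pattern (expiration days = 0)
--     # -----------------------------------------------------------------------
--     # Terraform / JSON / YAML variants that effectively destroy logs immediately.
--     if "expiration" in t and "days" in t and "0" in t:
--         # This is intentionally coarse: any expiration + days + 0 combo
--         # is treated as an anti-forensic configuration in the demo.
--         return True
--
--     # -----------------------------------------------------------------------
--     # Hardened: Azure NSG public exposure detection (alias + CIDR + arrays)
--     # -----------------------------------------------------------------------
--     # Normalize the text once
--     tl = t.lower()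
--
--     # Public exposure aliases used by Azure NSG
--     public_aliases = [
--         "internet",
--         "any",
--         "*",
--         "0.0.0.0/0",
--     ]
--
--     # Keys Azure uses for NSG rules (singular + plural)
--     nsg_keys = [
--         "sourceaddressprefix",
--         "sourceaddressprefixes",
--         "destinationaddressprefix",
--         "destinationaddressprefixes",
--         "sourceportrange",
--         "sourceportranges",
--         "destinationportrange",
--         "destinationportranges",
--     ]
--
--     # If any NSG key appears AND any public alias appears → exposure
--     if any(k in tl for k in nsg_keys) and any(alias in tl for alias in public_aliases):
--         return True
--
--     # Also catch explicit 0.0.0.0/0 exposure anywhere in the config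
--     if "0.0.0.0/0" in tl:
--         return True
--
--     return False
-- ===== SOURCE B (Python) =====
-- # Single-pass multi-pattern scanner: walk the lowered text once, collecting at
-- # each position every pattern that starts there, then evaluate the policy
-- # formula over the collected hit set (instead of 15 independent `in` scans).
--
-- _SINGLES = (
--     "allow_override = true", "risk_threshold = 0",
--     "boundary_sensitivity", "high",
--     "delete", "remove",
--     "admin", "root", "superuser",
--     "expiration", "days", "0",
-- )
-- _NSG_KEYS = (
--     "sourceaddressprefix", "sourceaddressprefixes",
--     "destinationaddressprefix", "destinationaddressprefixes",
--     "sourceportrange", "sourceportranges",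
--     "destinationportrange", "destinationportranges",
-- )
-- _PUBLIC_ALIASES = ("internet", "any", "*", "0.0.0.0/0")
-- _PATTERNS = _SINGLES + _NSG_KEYS + _PUBLIC_ALIASES
--
--
-- def detect_config_tampering(config_text: str) -> bool:
--     t = config_text.lower()
--     hits = set()
--     for i in range(len(t) + 1):
--         for p in _PATTERNS:
--             if t.startswith(p, i):
--                 hits.add(p)
--     nsg = any(k in hits for k in _NSG_KEYS)
--     public = any(a in hits for a in _PUBLIC_ALIASES)
--     return ("allow_override = true" in hits
--             or "risk_threshold = 0" in hits
--             or ("boundary_sensitivity" in hits and "high" in hits)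
--             or "delete" in hits or "remove" in hits
--             or "admin" in hits or "root" in hits or "superuser" in hits
--             or ("expiration" in hits and "days" in hits and "0" in hits)
--             or (nsg and public)
--             or "0.0.0.0/0" in hits)
-- ===== Notes on version B (the rewrite author's own statement) =====
-- stated objective: alternative
-- what changed: Replaced A's early-return chain of independent substring-membership scans by a single positional sweep of the lowered text that collects every matching pattern into a hit set, followed by one boolean evaluation of the policy formula over that set.
import Mathlib
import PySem

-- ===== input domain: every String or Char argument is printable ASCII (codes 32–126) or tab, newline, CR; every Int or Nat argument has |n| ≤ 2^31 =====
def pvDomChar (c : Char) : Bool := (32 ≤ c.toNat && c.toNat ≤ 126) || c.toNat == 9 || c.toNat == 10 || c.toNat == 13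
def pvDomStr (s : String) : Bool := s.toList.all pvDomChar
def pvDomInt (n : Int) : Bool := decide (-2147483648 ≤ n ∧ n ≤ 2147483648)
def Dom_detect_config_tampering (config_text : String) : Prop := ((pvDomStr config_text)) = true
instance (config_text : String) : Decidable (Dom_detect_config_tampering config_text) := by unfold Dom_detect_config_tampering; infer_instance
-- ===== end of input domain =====

-- B replaces A's chain of independent substring scans by one positional sweep collecting a hit
-- set of matched patterns, then one boolean evaluation (not faster; equivalence is exact).

-- ===== PORT A =====
def detect_config_tampering (config_text : String) : Bool :=
  let t := PySem.Str.lower config_text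
  if PySem.Str.isIn "allow_override = true" t then true
  else if PySem.Str.isIn "risk_threshold = 0" t then true
  else if PySem.Str.isIn "boundary_sensitivity" t && PySem.Str.isIn "high" t then true
  else if PySem.Str.isIn "delete" t || PySem.Str.isIn "remove" t then true
  else if PySem.Str.isIn "admin" t || PySem.Str.isIn "root" t || PySem.Str.isIn "superuser" t then true
  else if PySem.Str.isIn "expiration" t && PySem.Str.isIn "days" t && PySem.Str.isIn "0" t then true
  else
    let tl := PySem.Str.lower t
    let public_aliases : List String := ["internet", "any", "*", "0.0.0.0/0"]
    let nsg_keys : List String :=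
      ["sourceaddressprefix", "sourceaddressprefixes",
       "destinationaddressprefix", "destinationaddressprefixes",
       "sourceportrange", "sourceportranges",
       "destinationportrange", "destinationportranges"]
    if (nsg_keys.any fun k => PySem.Str.isIn k tl) &&
       (public_aliases.any fun al => PySem.Str.isIn al tl) then true
    else if PySem.Str.isIn "0.0.0.0/0" tl then true
    else false

-- ===== PORT B =====
def pvSingles : List String :=
  ["allow_override = true", "risk_threshold = 0",
   "boundary_sensitivity", "high",
   "delete", "remove",
   "admin", "root", "superuser",
   "expiration", "days", "0"]

def pvNsgKeys : List String :=
  ["sourceaddressprefix", "sourceaddressprefixes",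
   "destinationaddressprefix", "destinationaddressprefixes",
   "sourceportrange", "sourceportranges",
   "destinationportrange", "destinationportranges"]

def pvPublicAliases : List String := ["internet", "any", "*", "0.0.0.0/0"]

def pvPatterns : List String := pvSingles ++ pvNsgKeys ++ pvPublicAliases

-- the scan loop of Source B: for i in range(len(t)+1): for p in _PATTERNS: if t.startswith(p, i): hits.add(p)
-- (t.startswith(p, i) with 0 ≤ i is exactly: p.toList is a prefix of tl.drop i.toNat)
def pvHits (tl : List Char) : PySem.Set String :=
  (PySem.List.pyRange 0 ((tl.length : Int) + 1) 1).foldl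
    (fun acc i => pvPatterns.foldl
      (fun acc2 p => if PySem.Chars.startswith (tl.drop i.toNat) p.toList then PySem.Set.add acc2 p else acc2)
      acc)
    PySem.Set.empty

def detect_config_tampering_alt (config_text : String) : Bool :=
  let tl := (PySem.Str.lower config_text).toList
  let hits := pvHits tl
  let nsg := pvNsgKeys.any fun k => PySem.Set.contains hits k
  let pub := pvPublicAliases.any fun a => PySem.Set.contains hits a
  (PySem.Set.contains hits "allow_override = true" ||
   PySem.Set.contains hits "risk_threshold = 0" ||
   (PySem.Set.contains hits "boundary_sensitivity" && PySem.Set.contains hits "high") ||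
   PySem.Set.contains hits "delete" || PySem.Set.contains hits "remove" ||
   PySem.Set.contains hits "admin" || PySem.Set.contains hits "root" || PySem.Set.contains hits "superuser" ||
   (PySem.Set.contains hits "expiration" && PySem.Set.contains hits "days" && PySem.Set.contains hits "0") ||
   (nsg && pub) ||
   PySem.Set.contains hits "0.0.0.0/0")

-- ===== PRECONDITION & SPEC =====
def Spec_detect_config_tampering (config_text : String) (out : Bool) : Prop := out = detect_config_tampering_alt config_text
instance (config_text : String) (out : Bool) : Decidable (Spec_detect_config_tampering config_text out) := by unfold Spec_detect_config_tampering; infer_instance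

-- ===== CLAIM =====
def Claim_equal_detect_config_tampering : Prop := ∀ (config_text : String), Dom_detect_config_tampering config_text → Spec_detect_config_tampering config_text (detect_config_tampering config_text)

-- ===== LEMMAS AND PROOFS =====

theorem pv_charLe (a b : Char) : a ≤ b ↔ a.toNat ≤ b.toNat := by
  rw [Char.le_def, UInt32.le_iff_toNat_le]; rfl

theorem pv_ofNat_toNat (n : Nat) (h : n < 0xD800) : (Char.ofNat n).toNat = n := by
  unfold Char.ofNat
  split
  · simp [Char.ofNatAux, Char.toNat]
  · rename_i hv; exact absurd (Or.inl h) hv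

theorem pv_lowerChar_idem (c : Char) :
    PySem.Chars.lowerChar (PySem.Chars.lowerChar c) = PySem.Chars.lowerChar c := by
  unfold PySem.Chars.lowerChar PySem.Chars.isupper
  by_cases hA : 'A' ≤ c
  · by_cases hZ : c ≤ 'Z'
    · have h65 : 65 ≤ c.toNat := (pv_charLe _ _).mp hA
      have h90 : c.toNat ≤ 90 := (pv_charLe _ _).mp hZ
      have hd : (Char.ofNat (c.toNat + 32)).toNat = c.toNat + 32 :=
        pv_ofNat_toNat _ (by omega)
      have hnz : ¬ (Char.ofNat (c.toNat + 32)) ≤ 'Z' := by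
        rw [pv_charLe, hd]
        have hZ90 : ('Z' : Char).toNat = 90 := rfl
        omega
      simp only [hA, hZ, decide_true, Bool.and_true, if_pos]
      simp [hnz]
    · simp [hZ]
  · simp [hA]

theorem pv_lower_idem (s : String) :
    PySem.Str.lower (PySem.Str.lower s) = PySem.Str.lower s := by
  simp [PySem.Str.lower, PySem.Chars.lower, List.map_map, Function.comp_def, pv_lowerChar_idem]

theorem pv_mem_inner (c : String → Bool) (ps : List String) (acc : PySem.Set String) (q : String) :
    q ∈ ps.foldl (fun a2 p => if c p then PySem.Set.add a2 p else a2) acc ↔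
      q ∈ acc ∨ (q ∈ ps ∧ c q = true) := by
  induction ps generalizing acc with
  | nil => simp
  | cons hd tl ih =>
    simp only [List.foldl_cons, ih, List.mem_cons]
    by_cases h : c hd = true
    · rw [if_pos h, PySem.Set.mem_add]
      constructor
      · rintro ((hm | rfl) | ⟨hm, hc⟩)
        · exact Or.inl hm
        · exact Or.inr ⟨Or.inl rfl, h⟩
        · exact Or.inr ⟨Or.inr hm, hc⟩
      · rintro (hm | ⟨(rfl | hm), hc⟩)
        · exact Or.inl (Or.inl hm)
        · exact Or.inl (Or.inr rfl)
        · exact Or.inr ⟨hm, hc⟩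
    · rw [if_neg h]
      constructor
      · rintro (hm | ⟨hm, hc⟩)
        · exact Or.inl hm
        · exact Or.inr ⟨Or.inr hm, hc⟩
      · rintro (hm | ⟨(rfl | hm), hc⟩)
        · exact Or.inl hm
        · exact absurd hc h
        · exact Or.inr ⟨hm, hc⟩

theorem pv_mem_outer (tl : List Char) (is : List Int) (acc : PySem.Set String) (q : String) :
    q ∈ is.foldl
        (fun a i => pvPatterns.foldl
          (fun a2 p => if PySem.Chars.startswith (tl.drop i.toNat) p.toList then PySem.Set.add a2 p else a2) a)
        acc ↔
      q ∈ acc ∨ ∃ i ∈ is, q ∈ pvPatterns ∧ PySem.Chars.startswith (tl.drop i.toNat) q.toList = true := by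
  induction is generalizing acc with
  | nil => simp
  | cons hd tli ih =>
    simp only [List.foldl_cons, ih, pv_mem_inner, List.mem_cons]
    constructor
    · rintro ((hm | ⟨hp, hc⟩) | ⟨i, hi, hp, hc⟩)
      · exact Or.inl hm
      · exact Or.inr ⟨hd, Or.inl rfl, hp, hc⟩
      · exact Or.inr ⟨i, Or.inr hi, hp, hc⟩
    · rintro (hm | ⟨i, (rfl | hi), hp, hc⟩)
      · exact Or.inl (Or.inl hm)
      · exact Or.inl (Or.inr ⟨hp, hc⟩)
      · exact Or.inr ⟨i, hi, hp, hc⟩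

theorem pv_mem_hits (tl : List Char) (q : String) :
    q ∈ pvHits tl ↔
      ∃ i ∈ PySem.List.pyRange 0 ((tl.length : Int) + 1) 1,
        q ∈ pvPatterns ∧ PySem.Chars.startswith (tl.drop i.toNat) q.toList = true := by
  unfold pvHits
  rw [pv_mem_outer]
  simp [PySem.Set.empty]

theorem pv_contains_hits (tl : List Char) (q : String)
    (hq : q ∈ pvPatterns) (hne : q.toList ≠ []) :
    PySem.Set.contains (pvHits tl) q = PySem.Chars.isIn q.toList tl := by
  rw [Bool.eq_iff_iff, PySem.Set.contains_iff, pv_mem_hits,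
      ← PySem.Chars.exists_prefix_drop_iff_isIn]
  constructor
  · rintro ⟨i, hi, _, hsw⟩
    exact ⟨i.toNat, (PySem.Chars.startswith_iff _ _).mp hsw⟩
  · rintro ⟨j, hpref⟩
    by_cases hj : j ≤ tl.length
    · refine ⟨(j : Int), ?_, hq, ?_⟩
      · rw [PySem.List.mem_pyRange_one]
        constructor
        · exact Int.natCast_nonneg j
        · omega
      · rw [Int.toNat_natCast]
        exact (PySem.Chars.startswith_iff _ _).mpr hpref
    · exfalso
      rw [List.drop_eq_nil_of_le (by omega)] at hpref
      exact hne (List.prefix_nil.mp hpref)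

theorem pv_if_true_or (a r : Bool) : (if a = true then true else r) = (a || r) := by
  cases a <;> simp

theorem detect_config_tampering_spec : Claim_equal_detect_config_tampering := by
  intro s _
  unfold Spec_detect_config_tampering detect_config_tampering detect_config_tampering_alt
  simp only [pv_lower_idem]
  have H : ∀ q ∈ pvPatterns, PySem.Set.contains (pvHits (PySem.Str.lower s).toList) q
      = PySem.Chars.isIn q.toList (PySem.Str.lower s).toList := by
    intro q hq
    refine pv_contains_hits _ q hq ?_
    fin_cases hq <;> decide
  simp only [pvNsgKeys, pvPublicAliases, List.any_cons, List.any_nil, Bool.or_false]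
  rw [H "allow_override = true" (by decide), H "risk_threshold = 0" (by decide),
      H "boundary_sensitivity" (by decide), H "high" (by decide),
      H "delete" (by decide), H "remove" (by decide),
      H "admin" (by decide), H "root" (by decide), H "superuser" (by decide),
      H "expiration" (by decide), H "days" (by decide), H "0" (by decide),
      H "sourceaddressprefix" (by decide), H "sourceaddressprefixes" (by decide),
      H "destinationaddressprefix" (by decide), H "destinationaddressprefixes" (by decide),
      H "sourceportrange" (by decide), H "sourceportranges" (by decide),
      H "destinationportrange" (by decide), H "destinationportranges" (by decide),
      H "internet" (by decide), H "any" (by decide), H "*" (by decide),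
      H "0.0.0.0/0" (by decide)]
  simp only [PySem.Str.isIn_eq, pv_if_true_or]
  simp only [Bool.or_assoc, Bool.and_assoc]
  by_cases h : PySem.Chars.isIn "0.0.0.0/0".toList (PySem.Str.lower s).toList = true <;>
    simp_all
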